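-- pv_equiv track=rewrite | github.com/nishaalnaseer/stream_cipher_app | stream_cipher_server/stanChan.py | encodeInvisibleCharacters
-- ===== SOURCE A (Python) =====
-- INVISIBLE1 = "\u200C"
--
-- INVISIBLE2 = "\u200D"
--
-- DELIMITER = "\u2060"
--
-- def encodeInvisibleCharacters(message: str) -> str:
--     encoded = ""
--     utfBytes = message.encode("utf-8")
--     for byte in utfBytes:
--         for index in range(8):
--             bit = (byte >> (7 - index)) & 1
--             if bit == 1:
--                 encoded += INVISIBLE1
--             elif bit == 0:
--                 encoded += INVISIBLE2
--
--         encoded += DELIMITER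
--
--     return encoded
-- ===== SOURCE B (Python) =====
-- INVISIBLE1 = "\u200C"
--
-- INVISIBLE2 = "\u200D"
--
-- DELIMITER = "\u2060"
--
-- _TABLE = str.maketrans({ord('1'): INVISIBLE1, ord('0'): INVISIBLE2})
--
--
-- def encodeInvisibleCharacters(message: str) -> str:
--     pieces = [format(byte, '08b').translate(_TABLE) + DELIMITER
--               for byte in message.encode("utf-8")]
--     return ''.join(pieces)
-- ===== Notes on version B (the rewrite author's own statement) =====
-- stated objective: idiomatic
-- what changed: B drops the per-bit shift-and-branch inner loop: each byte is rendered as its zero-padded 8-digit binary string via format(), mapped to the invisible characters by a precomputed str.translate table, and the per-byte pieces are collected in a list and joined once instead of repeated string concatenation.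
import Mathlib
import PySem

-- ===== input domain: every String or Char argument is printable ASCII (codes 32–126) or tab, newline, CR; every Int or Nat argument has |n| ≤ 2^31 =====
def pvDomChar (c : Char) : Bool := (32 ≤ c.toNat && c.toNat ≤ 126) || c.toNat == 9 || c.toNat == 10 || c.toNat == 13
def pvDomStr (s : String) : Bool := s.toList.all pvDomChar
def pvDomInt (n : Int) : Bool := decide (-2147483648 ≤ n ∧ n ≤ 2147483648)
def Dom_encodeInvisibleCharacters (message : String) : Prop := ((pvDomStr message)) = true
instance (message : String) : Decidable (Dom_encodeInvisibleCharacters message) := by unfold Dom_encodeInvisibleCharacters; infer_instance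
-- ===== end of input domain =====

-- B replaces A's bit-shifting inner loop by format(byte,'08b') + a translate table, joining pieces at the end (idiomatic).
-- message.encode('utf-8') is ported as the list of char codes: exact on the ASCII domain Dom.
-- Strings are built as List Char and converted once at the end (PySem convention); '+=' on str is list append.

def invisible1 : Char := Char.ofNat 0x200C
def invisible2 : Char := Char.ofNat 0x200D
def delimiter : Char := Char.ofNat 0x2060

-- ===== PORT A =====
-- body of 'for byte in utfBytes': inner 'for index in range(8)' then '+= DELIMITER'
def encAByte (encoded : List Char) (byte : Nat) : List Char :=
  ((PySem.List.pyRange 0 8 1).foldl (fun enc index =>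
    let bit := (byte >>> (7 - index).toNat) &&& 1
    if bit = 1 then enc ++ [invisible1]
    else if bit = 0 then enc ++ [invisible2] else enc) encoded)
  ++ [delimiter]

def encodeInvisibleCharacters (message : String) : String :=
  String.ofList ((message.toList.map Char.toNat).foldl encAByte [])

-- ===== PORT B =====
-- the translate table: '1' -> INVISIBLE1, '0' -> INVISIBLE2, everything else unchanged
def transBit (c : Char) : Char :=
  if c = '1' then invisible1 else if c = '0' then invisible2 else c

-- format(byte, '08b').translate(_TABLE) + DELIMITER
def encBPiece (byte : Nat) : List Char :=
  (PySem.Chars.zfill (PySem.Int.toBinChars (byte : Int)) 8).map transBit ++ [delimiter]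

def encodeInvisibleCharacters_alt (message : String) : String :=
  String.ofList (((message.toList.map Char.toNat).map encBPiece).flatten)

-- ===== PRECONDITION & SPEC =====
def Spec_encodeInvisibleCharacters (message : String) (out : String) : Prop := out = encodeInvisibleCharacters_alt message
instance (message : String) (out : String) : Decidable (Spec_encodeInvisibleCharacters message out) := by unfold Spec_encodeInvisibleCharacters; infer_instance

-- ===== CLAIM (what is proved, stated in full; the proofs are below) =====
def Claim_equal_encodeInvisibleCharacters : Prop := ∀ (message : String), Dom_encodeInvisibleCharacters message → Spec_encodeInvisibleCharacters message (encodeInvisibleCharacters message)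

-- ===== LEMMAS AND PROOFS =====

-- what one inner-loop step appends
def bitPiece (byte : Nat) (index : Int) : List Char :=
  let bit := (byte >>> (7 - index).toNat) &&& 1
  if bit = 1 then [invisible1] else if bit = 0 then [invisible2] else []

theorem encAByte_eq_flatMap (s : List Char) (b : Nat) :
    encAByte s b = s ++ ((PySem.List.pyRange 0 8 1).flatMap (bitPiece b) ++ [delimiter]) := by
  unfold encAByte
  have h1 : List.foldl (fun enc index =>
      let bit := (b >>> (7 - index).toNat) &&& 1
      if bit = 1 then enc ++ [invisible1]
      else if bit = 0 then enc ++ [invisible2] else enc) s (PySem.List.pyRange 0 8 1)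
      = List.foldl (fun enc i => enc ++ bitPiece b i) s (PySem.List.pyRange 0 8 1) :=
    PySem.List.foldl_congr_mem _ _ _ _ (fun acc x _ => by
      simp only [bitPiece]; split_ifs <;> simp)
  rw [h1, PySem.List.foldl_append_eq_flatMap]
  simp [List.append_assoc]

-- the inner loop only appends: its effect on any accumulator is appending what it produces from []
theorem encAByte_append (s : List Char) (b : Nat) :
    encAByte s b = s ++ encAByte [] b := by
  rw [encAByte_eq_flatMap, encAByte_eq_flatMap]; simp

-- per-byte agreement of the two piece constructions, for every ASCII byte
set_option maxHeartbeats 1000000 in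
theorem piece_eq : ∀ b < 128, encAByte [] b = encBPiece b := by decide

theorem fold_eq (l : List Nat) (h : ∀ b ∈ l, b < 128) (s : List Char) :
    l.foldl encAByte s = s ++ (l.map encBPiece).flatten := by
  induction l generalizing s with
  | nil => simp
  | cons b t ih =>
    simp only [List.foldl, List.map, List.flatten]
    rw [ih (fun x hx => h x (List.mem_cons_of_mem _ hx)),
        encAByte_append, piece_eq b (h b (List.mem_cons_self ..))]
    simp

-- ===== VERDICT (by name: the statement is the Claim_ definition above) =====
theorem encodeInvisibleCharacters_spec : Claim_equal_encodeInvisibleCharacters := by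
  intro message hdom
  unfold Spec_encodeInvisibleCharacters encodeInvisibleCharacters encodeInvisibleCharacters_alt
  rw [fold_eq]
  · simp
  · intro b hb
    simp only [List.mem_map] at hb
    obtain ⟨c, hc, rfl⟩ := hb
    have := List.all_eq_true.mp hdom c hc
    simp [pvDomChar] at this
    omega
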